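-- pv_equiv track=rewrite | github.com/michalz1mniak/Matury | maj2024/rozwiazania/zadanie3/3_3.py | nieparzysty_skrot
-- ===== SOURCE A (Python) =====
-- def nieparzysty_skrot(n):
--     m = 0
--     p = 1
--     while n>0:
--         cyfra = n%10
--         n = n//10
--         if cyfra%2 == 1:
--             m += cyfra*p
--             p = p*10
--     return m
-- ===== SOURCE B (Python) =====
-- def nieparzysty_skrot(n):
--     if n <= 0:
--         return 0
--     rest = nieparzysty_skrot(n // 10)
--     d = n % 10
--     return rest * 10 + d if d % 2 == 1 else rest
-- ===== Notes on version B (the rewrite author's own statement) =====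
-- stated objective: simpler
-- what changed: Replaces A's bottom-up while-loop carrying two accumulators (result and a power-of-ten multiplier) with a direct recursion on the truncated number that builds the result most-significant-digit first, shifting the accumulated value one decimal place and appending each odd digit, eliminating the multiplier state.
import Mathlib
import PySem

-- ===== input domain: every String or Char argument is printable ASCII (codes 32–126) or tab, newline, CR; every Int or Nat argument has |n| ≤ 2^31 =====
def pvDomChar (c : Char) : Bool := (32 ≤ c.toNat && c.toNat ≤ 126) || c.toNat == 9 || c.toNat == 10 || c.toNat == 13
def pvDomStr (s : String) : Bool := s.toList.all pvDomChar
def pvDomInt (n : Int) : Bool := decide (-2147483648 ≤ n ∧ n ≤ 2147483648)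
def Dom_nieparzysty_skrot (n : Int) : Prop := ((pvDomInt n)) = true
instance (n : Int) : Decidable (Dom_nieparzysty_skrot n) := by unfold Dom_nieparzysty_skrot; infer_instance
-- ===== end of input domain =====

-- B replaces A's bottom-up loop (result + power-of-ten accumulators) by a direct
-- recursion on n // 10 building the result most-significant-digit first (simpler).

-- termination helper cited by both ports' decreasing_by
theorem pv_floordiv10_toNat_lt (n : Int) (h : 0 < n) :
    (PySem.Int.floordiv n 10).toNat < n.toNat := by
  have h1 : PySem.Int.floordiv n 10 < n := by
    rw [PySem.Int.floordiv_lt_iff_lt_mul (by norm_num)]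
    omega
  have h2 : (0 : Int) ≤ PySem.Int.floordiv n 10 := by
    have := (PySem.Int.le_floordiv_iff_mul_le (a := n) (b := 10) (q := 0) (by norm_num)).mpr
      (by omega)
    exact this
  omega

-- ===== PORT A =====
def nieparzysty_skrotLoop (n m p : Int) : Int :=
  if h : 0 < n then
    let cyfra := PySem.Int.mod n 10
    let n' := PySem.Int.floordiv n 10
    if PySem.Int.mod cyfra 2 = 1 then
      nieparzysty_skrotLoop n' (m + cyfra * p) (p * 10)
    else
      nieparzysty_skrotLoop n' m p
  else m
termination_by n.toNat
decreasing_by all_goals exact pv_floordiv10_toNat_lt n h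

def nieparzysty_skrot (n : Int) : Int := nieparzysty_skrotLoop n 0 1

-- ===== PORT B =====
def nieparzysty_skrot_alt (n : Int) : Int :=
  if h : n ≤ 0 then 0
  else
    let rest := nieparzysty_skrot_alt (PySem.Int.floordiv n 10)
    let d := PySem.Int.mod n 10
    if PySem.Int.mod d 2 = 1 then rest * 10 + d else rest
termination_by n.toNat
decreasing_by exact pv_floordiv10_toNat_lt n (by omega)

-- ===== PRECONDITION & SPEC =====
def Spec_nieparzysty_skrot (n : Int) (out : Int) : Prop := out = nieparzysty_skrot_alt n
instance (n : Int) (out : Int) : Decidable (Spec_nieparzysty_skrot n out) := by unfold Spec_nieparzysty_skrot; infer_instance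

-- ===== CLAIM (what is proved, stated in full; the proofs are below) =====
def Claim_equal_nieparzysty_skrot : Prop := ∀ (n : Int), Dom_nieparzysty_skrot n → Spec_nieparzysty_skrot n (nieparzysty_skrot n)

-- ===== LEMMAS AND PROOFS =====

theorem alt_nonpos (n : Int) (h : n ≤ 0) : nieparzysty_skrot_alt n = 0 := by
  rw [nieparzysty_skrot_alt]; simp [h]

-- loop invariant: the loop's final value is m plus p times B's value on the remaining n
theorem loop_eq (k : Nat) : ∀ (n m p : Int), n.toNat ≤ k →
    nieparzysty_skrotLoop n m p = m + p * nieparzysty_skrot_alt n := by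
  induction k with
  | zero =>
    intro n m p hk
    have hn : ¬ 0 < n := by omega
    rw [nieparzysty_skrotLoop, alt_nonpos n (by omega)]
    simp [hn]
  | succ k ih =>
    intro n m p hk
    by_cases hn : 0 < n
    · have hlt := pv_floordiv10_toNat_lt n hn
      rw [nieparzysty_skrotLoop, nieparzysty_skrot_alt]
      simp only [hn, dif_pos, not_le.mpr hn, dif_neg, not_false_iff]
      by_cases hodd : PySem.Int.mod (PySem.Int.mod n 10) 2 = 1
      · simp only [hodd, if_pos]
        rw [ih _ _ _ (by omega)]
        ring
      · simp only [hodd, if_neg, not_false_iff]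
        rw [ih _ _ _ (by omega)]
    · rw [nieparzysty_skrotLoop, alt_nonpos n (by omega)]
      simp [hn]

-- ===== VERDICT (by name: the statement is the Claim_ definition above) =====
theorem nieparzysty_skrot_spec : Claim_equal_nieparzysty_skrot := by
  intro n _
  unfold Spec_nieparzysty_skrot nieparzysty_skrot
  rw [loop_eq n.toNat n 0 1 (le_refl _)]
  ring
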